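-- pv_equiv track=rewrite | github.com/Plyxen/kod_tesztesetekkel | feladatok.py | egyedi_betuk
-- ===== SOURCE A (Python) =====
-- def egyedi_betuk(szoveg:str=""):
--     betuk = ""
--     i = 0
--
--     while i < len(szoveg):
--         if szoveg[i].isalpha():
--             betu = szoveg[i].lower()
--             if betu not in betuk:
--                 betuk += betu
--         i += 1
--
--     betuk = "".join(sorted(betuk))
--     eredmeny = []
--     j = 0
--
--     while j < len(betuk):
--         szamlalas = 0
--         k = 0
--         while k < len(szoveg):
--             if szoveg[k].isalpha() and szoveg[k].lower() == betuk[j]: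
--                 szamlalas += 1
--             k += 1
--         eredmeny.append(betuk[j] + ":" + str(szamlalas))
--         j += 1
--
--     return eredmeny
-- ===== SOURCE B (Python) =====
-- def egyedi_betuk(szoveg: str = ""):
--     # sort the lowered letters once, then group consecutive runs (no per-letter rescans)
--     ls = sorted(c.lower() for c in szoveg if c.isalpha())
--     eredmeny = []
--     while ls:
--         c = ls[0]
--         run = 1
--         while run < len(ls) and ls[run] == c:
--             run += 1
--         eredmeny.append(c + ":" + str(run))
--         ls = ls[run:]
--     return eredmeny
-- ===== Notes on version B (the rewrite author's own statement) =====
-- stated objective: faster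
-- what changed: Instead of deduplicating letters and rescanning the whole string once per distinct letter, B collects the lowered letters, sorts them once and emits counts by grouping consecutive runs in a single scan.
import Mathlib
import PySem

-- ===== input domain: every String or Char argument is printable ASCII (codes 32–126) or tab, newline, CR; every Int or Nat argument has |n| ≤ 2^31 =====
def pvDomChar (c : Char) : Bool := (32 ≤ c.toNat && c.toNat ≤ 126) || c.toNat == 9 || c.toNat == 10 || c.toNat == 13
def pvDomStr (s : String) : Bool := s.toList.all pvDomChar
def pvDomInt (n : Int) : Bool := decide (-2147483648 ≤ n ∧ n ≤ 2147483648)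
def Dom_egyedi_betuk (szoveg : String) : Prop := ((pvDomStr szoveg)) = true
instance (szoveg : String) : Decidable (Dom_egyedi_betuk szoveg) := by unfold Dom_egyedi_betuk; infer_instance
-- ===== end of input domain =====

-- B replaces A's per-distinct-letter rescans of the string with one sort of the lowered
-- letters followed by a single run-grouping scan.

-- ===== PORT A =====
-- first while loop: collect lowered letters, first occurrence only
def pvBetuk (cs : List Char) (b : List Char) : List Char :=
  match cs with
  | [] => b
  | c :: rest =>
    if PySem.Chars.isalpha c then
      let betu := PySem.Chars.lowerChar c
      if b.contains betu then pvBetuk rest b else pvBetuk rest (b ++ [betu])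
    else pvBetuk rest b

-- inner while loop: count occurrences of letter bj in szoveg
def pvSzamlalas (cs : List Char) (bj : Char) (acc : Int) : Int :=
  match cs with
  | [] => acc
  | c :: rest =>
    if PySem.Chars.isalpha c && (PySem.Chars.lowerChar c == bj) then
      pvSzamlalas rest bj (acc + 1)
    else pvSzamlalas rest bj acc

def egyedi_betuk (szoveg : String) : List String :=
  let betuk := pvBetuk szoveg.toList []
  let betukS := PySem.List.sorted betuk (fun x => x) false
  betukS.map (fun bj => String.ofList (bj :: ':' :: PySem.Int.toChars (pvSzamlalas szoveg.toList bj 0)))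

-- ===== PORT B =====
-- outer while loop of Source B: peel one run of equal letters off the sorted list at a time
def pvGroup (ls : List Char) : List String :=
  match ls with
  | [] => []
  | c :: rest =>
    let run : Int := 1 + (rest.takeWhile (· == c)).length
    String.ofList (c :: ':' :: PySem.Int.toChars run) :: pvGroup (rest.dropWhile (· == c))
termination_by ls.length
decreasing_by
  simp only [List.length_cons]
  exact Nat.lt_succ_of_le (List.length_dropWhile_le _ _)

def egyedi_betuk_alt (szoveg : String) : List String :=
  let ls := PySem.List.sorted
      ((szoveg.toList.filter (fun c => PySem.Chars.isalpha c)).map PySem.Chars.lowerChar)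
      (fun x => x) false
  pvGroup ls

-- ===== PRECONDITION & SPEC =====
def Spec_egyedi_betuk (szoveg : String) (out : List String) : Prop := out = egyedi_betuk_alt szoveg
instance (szoveg : String) (out : List String) : Decidable (Spec_egyedi_betuk szoveg out) := by unfold Spec_egyedi_betuk; infer_instance

-- ===== CLAIM (what is proved, stated in full; the proofs are below) =====
def Claim_equal_egyedi_betuk : Prop := ∀ (szoveg : String), Dom_egyedi_betuk szoveg → Spec_egyedi_betuk szoveg (egyedi_betuk szoveg)

-- ===== LEMMAS AND PROOFS =====

-- A's first loop builds the first-occurrence dedup (PySem.Set.ofList) of the lowered letters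
theorem pvBetuk_eq (cs : List Char) (b : List Char) :
    pvBetuk cs b = ((cs.filter (fun c => PySem.Chars.isalpha c)).map PySem.Chars.lowerChar).foldl PySem.Set.add b := by
  induction cs generalizing b with
  | nil => rfl
  | cons c rest ih =>
    simp only [pvBetuk, List.filter_cons]
    by_cases h : PySem.Chars.isalpha c
    · simp only [h, if_true, List.map_cons, List.foldl_cons, PySem.Set.add, PySem.Set.contains]
      by_cases hm : PySem.Chars.lowerChar c ∈ b
      · simp [hm, ih]
      · simp [hm, ih]
    · simp [h, ih]

-- A's inner loop counts the letter in the lowered-letters list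
theorem pvSzamlalas_eq (cs : List Char) (bj : Char) (acc : Int) :
    pvSzamlalas cs bj acc =
      acc + (((cs.filter (fun c => PySem.Chars.isalpha c)).map PySem.Chars.lowerChar).count bj : Int) := by
  induction cs generalizing acc with
  | nil => simp [pvSzamlalas]
  | cons c rest ih =>
    simp only [pvSzamlalas, List.filter_cons]
    by_cases h : PySem.Chars.isalpha c
    · by_cases he : PySem.Chars.lowerChar c = bj
      · simp [h, he, ih]; ring
      · simp [h, he, ih]
    · simp [h, ih]

-- adding elements already avoided leaves a prefix untouched
theorem foldl_add_append (R : List Char) (b s : List Char) (hb : ∀ x ∈ R, x ∉ b) :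
    List.foldl PySem.Set.add (b ++ s) R = b ++ List.foldl PySem.Set.add s R := by
  induction R generalizing s with
  | nil => rfl
  | cons x R ih =>
    have hx : x ∉ b := hb x (by simp)
    have hrest : ∀ y ∈ R, y ∉ b := fun y hy => hb y (by simp [hy])
    simp only [List.foldl_cons]
    have hadd : PySem.Set.add (b ++ s) x = b ++ PySem.Set.add s x := by
      by_cases hxs : x ∈ s
      · simp [PySem.Set.add, PySem.Set.contains, hxs]
      · simp [PySem.Set.add, PySem.Set.contains, hxs, hx]
    rw [hadd, ih _ hrest]

-- dedup of a run-headed sorted list peels the head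
theorem dedup_cons_of_not_mem (c : Char) (t R : List Char)
    (ht : ∀ x ∈ t, x = c) (hR : ∀ x ∈ R, x ≠ c) :
    PySem.List.dedup (c :: (t ++ R)) = c :: PySem.List.dedup R := by
  simp only [PySem.List.dedup, PySem.Set.ofList, List.foldl_cons, List.foldl_append]
  have h0 : PySem.Set.add PySem.Set.empty c = [c] := rfl
  rw [h0]
  have ht' : List.foldl PySem.Set.add [c] t = [c] := by
    induction t with
    | nil => rfl
    | cons y t ih =>
      have hy : y = c := ht y (by simp)
      have : PySem.Set.add [c] y = [c] := by
        simp [PySem.Set.add, PySem.Set.contains, hy]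
      simp only [List.foldl_cons, this]
      exact ih fun x hx => ht x (by simp [hx])
  rw [ht']
  have := foldl_add_append R [c] [] (by intro x hx; simp [hR x hx])
  simpa using this

-- the dedup of a list is one of its sublists
theorem dedup_sublist (L : List Char) : (PySem.List.dedup L).Sublist L := by
  suffices h : ∀ (L b : List Char), ∃ t, L.foldl PySem.Set.add b = b ++ t ∧ t.Sublist L by
    obtain ⟨t, h1, h2⟩ := h L []
    simpa [PySem.List.dedup, PySem.Set.ofList, h1] using h2
  intro L
  induction L with
  | nil => exact fun b => ⟨[], by simp⟩
  | cons x L ih =>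
    intro b
    simp only [List.foldl_cons]
    by_cases hx : b.contains x
    · have hx' : x ∈ b := by simpa using hx
      rw [show PySem.Set.add b x = b from by simp [PySem.Set.add, PySem.Set.contains, hx']]
      obtain ⟨t, h1, h2⟩ := ih b
      exact ⟨t, h1, h2.cons x⟩
    · have hx' : x ∉ b := by simpa using hx
      rw [show PySem.Set.add b x = b ++ [x] from by
        simp [PySem.Set.add, PySem.Set.contains, hx']]
      obtain ⟨t, h1, h2⟩ := ih (b ++ [x])
      exact ⟨x :: t, by simpa using h1, h2.cons₂ x⟩

-- main grouping lemma: on a sorted list, pvGroup lists each distinct letter with its count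
theorem pvGroup_eq (L : List Char) (h : L.Pairwise (· ≤ ·)) :
    pvGroup L = (PySem.List.dedup L).map
      (fun c => String.ofList (c :: ':' :: PySem.Int.toChars (L.count c : Int))) := by
  induction L using pvGroup.induct with
  | case1 => simp [pvGroup, PySem.List.dedup, PySem.Set.ofList, PySem.Set.empty]
  | case2 c rest ih =>
    set t := rest.takeWhile (· == c) with htdef
    set R := rest.dropWhile (· == c) with hRdef
    have hsplit : rest = t ++ R := (List.takeWhile_append_dropWhile).symm
    have ht : ∀ x ∈ t, x = c := by
      intro x hx
      have := List.mem_takeWhile_imp hx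
      simpa using this
    have hcle : ∀ x ∈ rest, c ≤ x := by
      intro x hx; exact (List.pairwise_cons.mp h).1 x hx
    have hR : ∀ x ∈ R, x ≠ c := by
      intro x hx
      cases hRe : R with
      | nil => simp [hRe] at hx
      | cons d R' =>
        have hd : ¬ (d == c) := by
          have := List.head?_dropWhile_not (· == c) rest
          rw [← hRdef, hRe] at this
          simpa using this
        have hdne : d ≠ c := by simpa using hd
        have hdR : c < d := by
          have : c ≤ d := hcle d (by rw [hsplit, hRe]; simp)
          exact lt_of_le_of_ne this (Ne.symm hdne)
        have hRp : (d :: R').Pairwise (· ≤ ·) := by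
          have : R.Sublist rest := List.dropWhile_sublist _
          rw [hRe] at this
          exact ((List.pairwise_cons.mp h).2).sublist this
        rw [hRe] at hx
        rcases List.mem_cons.mp hx with h1 | h1
        · subst h1; exact hdne
        · have : d ≤ x := (List.pairwise_cons.mp hRp).1 x h1
          exact ne_of_gt (lt_of_lt_of_le hdR this)
    have hRp : R.Pairwise (· ≤ ·) :=
      ((List.pairwise_cons.mp h).2).sublist (List.dropWhile_sublist _)
    have hded : PySem.List.dedup (c :: rest) = c :: PySem.List.dedup R := by
      rw [hsplit]; exact dedup_cons_of_not_mem c t R ht hR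
    have hcountc : ((c :: rest).count c : Int) = 1 + (t.length : Int) := by
      have htc : t.count c = t.length := List.count_eq_length.mpr (fun b hb => (ht b hb).symm)
      have hRc : R.count c = 0 := List.count_eq_zero.mpr (fun hc => hR c hc rfl)
      rw [hsplit]
      simp [List.count_append, htc, hRc]
      ring
    have hcountR : ∀ x ∈ PySem.List.dedup R, (c :: rest).count x = R.count x := by
      intro x hx
      have hxR : x ∈ R := by
        have := dedup_sublist R
        exact this.mem hx
      have hxc : x ≠ c := hR x hxR
      have hxt : x ∉ t := fun hxt => hxc (ht x hxt)
      rw [hsplit]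
      simp [List.count_cons, List.count_append, Ne.symm hxc,
        List.count_eq_zero.mpr hxt]
    rw [pvGroup, hded]
    simp only [List.map_cons]
    congr 1
    · rw [hcountc]
    · rw [ih hRp]
      exact (List.map_congr_left (fun x hx => by rw [hcountR x hx])).symm

-- sorted(dedup F) is the dedup of sorted(F)
theorem sorted_dedup_eq (F : List Char) :
    PySem.List.sorted (PySem.Set.ofList F) (fun x => x) false
      = PySem.List.dedup (PySem.List.sorted F (fun x => x) false) := by
  set L := PySem.List.sorted F (fun x => x) false with hL
  have hperm : (PySem.List.dedup L).Perm (PySem.Set.ofList F) := by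
    rw [List.perm_ext_iff_of_nodup]
    · intro a
      rw [PySem.List.dedup, PySem.Set.mem_ofList, PySem.Set.mem_ofList,
        PySem.List.mem_sorted]
    · rw [PySem.List.dedup]; exact PySem.Set.nodup_ofList L
    · exact PySem.Set.nodup_ofList F
  have hpl : (PySem.List.dedup L).Pairwise (· < ·) := by
    have hle : L.Pairwise (· ≤ ·) := by
      simpa using PySem.List.sorted_pairwise F (fun x => x)
    have hsub := dedup_sublist L
    have h1 : (PySem.List.dedup L).Pairwise (· ≤ ·) := hle.sublist hsub
    have h2 : (PySem.List.dedup L).Nodup := by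
      rw [PySem.List.dedup]; exact PySem.Set.nodup_ofList L
    have := h1.and h2
    exact this.imp (fun {a b} hab => lt_of_le_of_ne hab.1 hab.2)
  exact PySem.List.sorted_eq_of_perm_of_pairwise_lt _ _ _ hperm hpl

-- ===== VERDICT (by name: the statement is the Claim_ definition above) =====
theorem egyedi_betuk_spec : Claim_equal_egyedi_betuk := by
  intro szoveg _
  unfold Spec_egyedi_betuk egyedi_betuk egyedi_betuk_alt
  set F := (szoveg.toList.filter (fun c => PySem.Chars.isalpha c)).map PySem.Chars.lowerChar with hF
  set L := PySem.List.sorted F (fun x => x) false with hL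
  have hLe : L.Pairwise (· ≤ ·) := by
    simpa using PySem.List.sorted_pairwise F (fun x => x)
  have hb : pvBetuk szoveg.toList [] = PySem.Set.ofList F := by
    rw [pvBetuk_eq]; rfl
  simp only [hb, sorted_dedup_eq F, ← hL]
  rw [pvGroup_eq L hLe]
  apply List.map_congr_left
  intro c hc
  have hcount : L.count c = F.count c := (PySem.List.sorted_perm F (fun x => x) false).count_eq c
  rw [pvSzamlalas_eq, hcount, ← hF]
  simp
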